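-- pv_equiv track=rewrite | github.com/OpenRailAssociation/github-org-manager | gh_org_mgr/_helpers.py | dict_to_pretty_string
-- ===== SOURCE A (Python) =====
-- def dict_to_pretty_string(dictionary: dict, sensible_keys: None | list[str] = None) -> str:
--     """Convert a dict to a pretty-printed output"""
--
--     # Censor sensible fields
--     def censor_half_string(string: str) -> str:
--         """Censor 50% of a string (rounded up)"""
--         half1 = int(len(string) / 2)
--         half2 = len(string) - half1
--         return string[:half1] + "*" * (half2)
--
--     if sensible_keys is None:
--         sensible_keys = []
--     for key in sensible_keys:
--         if value := dictionary.get(key, ""):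
--             dictionary[key] = censor_half_string(value)
--
--     # Print dict nicely
--     def pretty(d, indent=0):
--         string = ""
--         for key, value in d.items():
--             string += "  " * indent + str(key) + ":\n"
--             if isinstance(value, dict):
--                 string += pretty(value, indent + 1)
--             else:
--                 string += "  " * (indent + 1) + str(value) + "\n"
--
--         return string
--
--     return pretty(dictionary)
-- ===== SOURCE B (Python) =====
-- def dict_to_pretty_string(dictionary, sensible_keys=None):
--     """Convert a dict to a pretty-printed output, censoring sensible fields.
--
--     Single pass over the dict items with a membership set; does not mutate
--     `dictionary` (the original censors it in place).
--     """
--     sens = set(sensible_keys or [])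
--     lines = []
--     for key, value in dictionary.items():
--         if key in sens and value:
--             half = len(value) // 2
--             value = value[:half] + "*" * (len(value) - half)
--         lines.append(str(key) + ":")
--         lines.append("  " + str(value))
--     return "".join(line + "\n" for line in lines)
-- ===== Notes on version B (the rewrite author's own statement) =====
-- stated objective: simpler
-- what changed: Replaces the mutate-then-recursively-print scheme (loop over sensible_keys doing dict lookups and in-place assignments, then a recursive pretty() with string +=) by a single pass over the dict items that masks against a membership set and joins a flat list of lines; B does not mutate the input dict (return value is identical).
import Mathlib
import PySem

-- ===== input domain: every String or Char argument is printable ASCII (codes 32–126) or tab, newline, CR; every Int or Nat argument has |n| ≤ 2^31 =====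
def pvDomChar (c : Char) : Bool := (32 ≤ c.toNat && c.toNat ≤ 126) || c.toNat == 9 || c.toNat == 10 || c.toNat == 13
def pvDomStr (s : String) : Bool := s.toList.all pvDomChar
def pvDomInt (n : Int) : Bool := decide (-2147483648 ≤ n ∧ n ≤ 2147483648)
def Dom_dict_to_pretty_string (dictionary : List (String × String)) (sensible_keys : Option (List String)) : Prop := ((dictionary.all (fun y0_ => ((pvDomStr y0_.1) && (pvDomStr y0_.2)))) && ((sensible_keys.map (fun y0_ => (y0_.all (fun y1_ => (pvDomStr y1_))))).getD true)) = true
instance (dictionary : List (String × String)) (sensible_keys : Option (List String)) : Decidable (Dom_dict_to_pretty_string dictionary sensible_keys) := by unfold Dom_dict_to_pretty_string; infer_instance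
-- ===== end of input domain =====

-- B replaces A's censor-loop-then-recursive-print by a single masking pass over the dict
-- items joined into lines ("simpler"); equivalence is about the RETURN value only: A
-- mutates `dictionary` in place (censoring), B does not.

-- ===== PORT A =====
-- censor_half_string: string[:half1] + "*" * half2  (on List Char; int(len/2) = len/2 for a Nat length)
def pvCensorA (cs : List Char) : List Char :=
  let half1 : Nat := cs.length / 2
  let half2 : Nat := cs.length - half1
  PySem.List.slice cs none (some (half1 : Int)) ++ List.replicate half2 '*'

-- pretty(d, indent): in the typed model dict[str, str] a value is never a dict, so only the
-- else-branch of `isinstance(value, dict)` is reachable; "  " * indent is replicate (2*indent) ' '.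
def pvPrettyA : List (String × String) → Nat → List Char
  | [], _ => []
  | (key, value) :: rest, indent =>
      (List.replicate (2 * indent) ' ' ++ key.toList ++ [':', '\n'])
        ++ (List.replicate (2 * (indent + 1)) ' ' ++ value.toList ++ ['\n'])
        ++ pvPrettyA rest indent

def dict_to_pretty_string (dictionary : List (String × String)) (sensible_keys : Option (List String)) : String :=
  -- `if sensible_keys is None: sensible_keys = []`
  let sks := sensible_keys.getD []
  -- the censoring loop, mutating the dict (dictionary.get(key, "") truthiness guard)
  let d := sks.foldl
    (fun d key =>
      let value := d.getD key ""
      if value ≠ "" then d.insert key (String.ofList (pvCensorA value.toList)) else d)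
    (PySem.Dict.ofList dictionary)
  String.ofList (pvPrettyA d.items 0)

-- ===== PORT B =====
def dict_to_pretty_string_alt (dictionary : List (String × String)) (sensible_keys : Option (List String)) : String :=
  let sens := PySem.Set.ofList (sensible_keys.getD [])
  let lines : List (List Char) :=
    (PySem.Dict.ofList dictionary).items.flatMap (fun kv =>
      let value :=
        if kv.1 ∈ sens ∧ kv.2 ≠ "" then
          let cs := kv.2.toList
          let half := cs.length / 2
          cs.take half ++ List.replicate (cs.length - half) '*'
        else kv.2.toList
      [kv.1.toList ++ [':'], ' ' :: ' ' :: value])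
  String.ofList (lines.flatMap (fun l => l ++ ['\n']))

-- ===== PRECONDITION & SPEC =====
def Spec_dict_to_pretty_string (dictionary : List (String × String)) (sensible_keys : Option (List String)) (out : String) : Prop := out = dict_to_pretty_string_alt dictionary sensible_keys
instance (dictionary : List (String × String)) (sensible_keys : Option (List String)) (out : String) : Decidable (Spec_dict_to_pretty_string dictionary sensible_keys out) := by unfold Spec_dict_to_pretty_string; infer_instance

-- ===== CLAIM (what is proved, stated in full; the proofs are below) =====
def Claim_equal_dict_to_pretty_string : Prop := ∀ (dictionary : List (String × String)) (sensible_keys : Option (List String)), Dom_dict_to_pretty_string dictionary sensible_keys → Spec_dict_to_pretty_string dictionary sensible_keys (dict_to_pretty_string dictionary sensible_keys)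

-- ===== LEMMAS AND PROOFS =====

-- censoring one entry, at the item level
def pvMask1 (k : String) (p : String × String) : String × String :=
  if p.1 = k ∧ p.2 ≠ "" then (p.1, String.ofList (pvCensorA p.2.toList)) else p

-- the cumulative effect of the whole censoring loop on one item
def pvMaskAll (l : List String) (p : String × String) : String × String :=
  if p.1 ∈ l ∧ p.2 ≠ "" then (p.1, String.ofList (pvCensorA p.2.toList)) else p

theorem pvCensorA_eq_take (cs : List Char) :
    pvCensorA cs = cs.take (cs.length / 2) ++ List.replicate (cs.length - cs.length / 2) '*' := by
  simp only [pvCensorA]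
  rw [PySem.List.slice_to_natCast]

theorem pvCensorA_length (cs : List Char) : (pvCensorA cs).length = cs.length := by
  rw [pvCensorA_eq_take]
  simp
  omega

theorem pvCensorA_idem (cs : List Char) : pvCensorA (pvCensorA cs) = pvCensorA cs := by
  rw [pvCensorA_eq_take (pvCensorA cs), pvCensorA_length]
  rw [pvCensorA_eq_take cs]
  congr 1
  rw [List.take_append_of_le_length (by simp; omega)]
  rw [List.take_take]
  congr 1
  omega

theorem pvCensorA_ne_nil (cs : List Char) (h : cs ≠ []) : pvCensorA cs ≠ [] := by
  intro hc
  have := pvCensorA_length cs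
  rw [hc] at this
  simp at this
  exact h (List.eq_nil_of_length_eq_zero this.symm)

theorem pvToList_ne_nil {s : String} (h : s ≠ "") : s.toList ≠ [] := by
  intro hc
  apply h
  have := congrArg String.ofList hc
  simpa using this

-- one pass of pvMask1 after another collapses to pvMaskAll
theorem pvMaskAll_cons (k : String) (l : List String) (p : String × String) :
    pvMaskAll l (pvMask1 k p) = pvMaskAll (k :: l) p := by
  unfold pvMask1 pvMaskAll
  by_cases h1 : p.1 = k ∧ p.2 ≠ ""
  · rw [if_pos h1]
    have hlnil : pvCensorA p.2.toList ≠ [] := pvCensorA_ne_nil _ (pvToList_ne_nil h1.2)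
    have hne : String.ofList (pvCensorA p.2.toList) ≠ "" := by simpa using hlnil
    rw [if_pos (show p.1 ∈ k :: l ∧ p.2 ≠ "" from ⟨by simp [h1.1], h1.2⟩)]
    dsimp only
    by_cases hm : p.1 ∈ l
    · rw [if_pos ⟨hm, hne⟩]
      congr 1
      rw [show (String.ofList (pvCensorA p.2.toList)).toList = pvCensorA p.2.toList by simp]
      rw [pvCensorA_idem]
    · rw [if_neg (fun hc => hm hc.1)]
  · rw [if_neg h1]
    by_cases hp2 : p.2 = ""
    · rw [if_neg (fun hc => hc.2 hp2), if_neg (fun hc => hc.2 hp2)]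
    · have hk : p.1 ≠ k := fun hc => h1 ⟨hc, hp2⟩
      by_cases hm : p.1 ∈ l
      · rw [if_pos ⟨hm, hp2⟩, if_pos ⟨List.mem_cons_of_mem _ hm, hp2⟩]
      · rw [if_neg (fun hc => hm hc.1)]
        rw [if_neg (fun hc => (List.mem_cons.mp hc.1).elim hk hm)]

-- one loop iteration, at the items level
theorem loop_step_items (d : PySem.Dict String String) (hnd : d.keys.Nodup) (key : String) :
    (if d.getD key "" ≠ "" then
        d.insert key (String.ofList (pvCensorA (d.getD key "").toList))
      else d).items
      = d.items.map (pvMask1 key) := by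
  by_cases hv : d.getD key "" ≠ ""
  · rw [if_pos hv]
    have hc : d.contains key = true := by
      by_contra hcn
      exact hv (PySem.Dict.getD_of_not_contains d "" (by simpa using hcn))
    rw [PySem.Dict.items_insert_of_contains _ _ hc]
    apply List.map_congr_left
    intro p hp
    have hget : d.getD p.1 "" = p.2 :=
      PySem.Dict.getD_of_mem_items d (k := p.1) (v := p.2) (by simpa using hp) hnd ""
    unfold pvMask1
    by_cases hpk : p.1 = key
    · rw [if_pos (by simpa using hpk)]
      rw [if_pos ⟨hpk, by rw [← hget, hpk]; exact hv⟩]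
      rw [← hpk, hget]
    · rw [if_neg (by simpa using hpk), if_neg (fun hc' => hpk hc'.1)]
  · rw [if_neg hv]
    conv_lhs => rw [← List.map_id d.items]
    apply List.map_congr_left
    intro p hp
    have hget : d.getD p.1 "" = p.2 :=
      PySem.Dict.getD_of_mem_items d (k := p.1) (v := p.2) (by simpa using hp) hnd ""
    show id p = pvMask1 key p
    unfold pvMask1
    rw [if_neg]
    · rfl
    · intro hc'
      rw [hc'.1] at hget
      simp only [not_not] at hv
      exact hc'.2 (by rw [← hget, hv])

-- the whole censoring loop maps pvMaskAll over the items
theorem loop_items (l : List String) (d : PySem.Dict String String) (hnd : d.keys.Nodup) :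
    (l.foldl (fun d key =>
        let value := d.getD key ""
        if value ≠ "" then d.insert key (String.ofList (pvCensorA value.toList)) else d) d).items
      = d.items.map (pvMaskAll l) := by
  induction l generalizing d with
  | nil =>
    rw [List.foldl_nil]
    conv_rhs => rw [show pvMaskAll [] = id from funext fun p => by simp [pvMaskAll]]
    rw [List.map_id]
  | cons k l ih =>
    rw [List.foldl_cons]
    dsimp only
    have hnd' : (if d.getD k "" ≠ "" then
        d.insert k (String.ofList (pvCensorA (d.getD k "").toList)) else d).keys.Nodup := by
      split
      · exact PySem.Dict.nodup_keys_insert _ _ _ hnd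
      · exact hnd
    rw [ih _ hnd', loop_step_items d hnd k, List.map_map]
    exact List.map_congr_left (fun p _ => pvMaskAll_cons k l p)

-- ===== VERDICT (by name: the statement is the Claim_ definition above) =====
theorem dict_to_pretty_string_spec : Claim_equal_dict_to_pretty_string := by
  intro dictionary sensible_keys _
  unfold Spec_dict_to_pretty_string dict_to_pretty_string dict_to_pretty_string_alt
  dsimp only
  rw [loop_items _ _ (PySem.Dict.nodup_keys_ofList _)]
  congr 1
  generalize (PySem.Dict.ofList dictionary).items = items
  induction items with
  | nil => simp [pvPrettyA]
  | cons p rest ih =>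
    simp only [List.map_cons, List.flatMap_cons]
    rw [show pvPrettyA (pvMaskAll (sensible_keys.getD []) p :: rest.map (pvMaskAll (sensible_keys.getD []))) 0
          = (List.replicate (2 * 0) ' ' ++ (pvMaskAll (sensible_keys.getD []) p).1.toList ++ [':', '\n'])
            ++ (List.replicate (2 * (0 + 1)) ' ' ++ (pvMaskAll (sensible_keys.getD []) p).2.toList ++ ['\n'])
            ++ pvPrettyA (rest.map (pvMaskAll (sensible_keys.getD []))) 0 from rfl]
    rw [ih]
    unfold pvMaskAll
    by_cases hc : p.1 ∈ sensible_keys.getD [] ∧ p.2 ≠ ""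
    · rw [if_pos hc, if_pos ⟨by simpa using hc.1, hc.2⟩]
      rw [pvCensorA_eq_take]
      simp
    · rw [if_neg hc, if_neg (by simpa using hc)]
      simp
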